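-- pv_equiv track=rewrite | github.com/dbizdfvy/TFPX | utils/polygon.py | make_sublists
-- ===== SOURCE A (Python) =====
-- def make_sublists(sorted_list):
--     '''
--     Given a sorted list, returns a nested list with each sublist consisting of elements with the same x coordinate.
--     ex)
--
--     sorted_list = [[0,0],[0,1],[0,2],[1,3],[1,6],[2,2]]
--     make_sublists(sorted_list) returns [ [ [0,0],[0,1],[0,2] ],[ [1,3],[1,6] ],[ [2,2] ]].
--
--     '''
--
--     sublists = []
--     current_x = None
--     current_sublist = []
--
--     for x, y in sorted_list:
--         if x != current_x:
--             if current_sublist: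
--                 sublists.append(current_sublist)
--                 current_sublist = []
--             current_x = x
--
--         current_sublist.append([x, y])
--
--     # Add the last sublist
--     if current_sublist:
--         sublists.append(current_sublist)
--
--     return sublists
-- ===== SOURCE B (Python) =====
-- def make_sublists(sorted_list):
--     # Build the grouping back-to-front: walk the points in reverse and prepend
--     # each point to the front group when its x matches, else open a new front group.
--     pts = [[x, y] for x, y in sorted_list]
--     groups = []
--     for p in reversed(pts):
--         if groups and groups[0][0][0] == p[0]:
--             groups[0] = [p] + groups[0]
--         else:
--             groups = [[p]] + groups
--     return groups
-- ===== Notes on version B (the rewrite author's own statement) =====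
-- stated objective: alternative
-- what changed: B builds the grouping back-to-front in one reversed pass that prepends each point to the front group (a foldr), instead of A's forward pass with a current_x/current_sublist accumulator and a final flush; Pre_ excludes lists containing a point without exactly 2 coordinates, on which both A and B raise ValueError while unpacking.
import Mathlib
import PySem

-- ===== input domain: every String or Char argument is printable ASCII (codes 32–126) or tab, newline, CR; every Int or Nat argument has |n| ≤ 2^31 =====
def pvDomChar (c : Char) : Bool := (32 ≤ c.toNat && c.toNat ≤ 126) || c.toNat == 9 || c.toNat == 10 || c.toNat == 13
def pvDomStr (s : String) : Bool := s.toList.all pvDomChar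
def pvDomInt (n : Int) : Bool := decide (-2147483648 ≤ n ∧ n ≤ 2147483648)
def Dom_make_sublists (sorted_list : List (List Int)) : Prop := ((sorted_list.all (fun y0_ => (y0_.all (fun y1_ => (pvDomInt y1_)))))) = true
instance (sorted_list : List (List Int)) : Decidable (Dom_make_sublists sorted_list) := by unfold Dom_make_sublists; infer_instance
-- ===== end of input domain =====

-- B builds the grouping back-to-front in one reversed pass (a foldr) that prepends each
-- point to the front group, instead of A's forward pass with a current_x/current_sublist
-- accumulator and a final flush.

-- ===== PORT A =====
-- state = (sublists, current_x, current_sublist); a non-length-2 point raises in Python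
-- (excluded by Pre_), so the catch-all arm is never reached on admitted inputs.
def stepA (st : List (List (List Int)) × Option Int × List (List Int)) (p : List Int) :
    List (List (List Int)) × Option Int × List (List Int) :=
  match p with
  | [x, y] =>
    match st with
    | (subs, cx, cur) =>
      if some x ≠ cx then
        if cur ≠ [] then (subs ++ [cur], some x, [] ++ [[x, y]])
        else (subs, some x, cur ++ [[x, y]])
      else (subs, cx, cur ++ [[x, y]])
  | _ => st

def make_sublists (sorted_list : List (List Int)) : List (List (List Int)) :=
  match sorted_list.foldl stepA ([], none, []) with
  | (subs, _, cur) => if cur ≠ [] then subs ++ [cur] else subs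

-- ===== PORT B =====
-- pts = [[x, y] for x, y in sorted_list]; the catch-all arm mirrors the (excluded) raise.
def convB (p : List Int) : List Int :=
  match p with
  | [x, y] => [x, y]
  | _ => p

-- one step of the reversed loop: groups[0][0][0] is (first group's first point)'s x,
-- written with headD (the lists involved are nonempty whenever Python reads them)
def stepB (p : List Int) (groups : List (List (List Int))) : List (List (List Int)) :=
  match groups with
  | (q :: g0) :: gs =>
      if (q.headD 0) == (p.headD 0) then (([p] ++ (q :: g0)) :: gs)
      else [p] :: (q :: g0) :: gs
  | _ => [p] :: groups

def make_sublists_alt (sorted_list : List (List Int)) : List (List (List Int)) :=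
  (sorted_list.map convB).foldr stepB []

-- ===== PRECONDITION & SPEC =====
-- Pre_ excludes lists containing a point without exactly 2 coordinates: there Python A
-- (and Python B) raise ValueError while unpacking.
def Pre_make_sublists (sorted_list : List (List Int)) : Prop :=
  ∀ p ∈ sorted_list, p.length = 2
instance (sorted_list : List (List Int)) : Decidable (Pre_make_sublists sorted_list) := by
  unfold Pre_make_sublists; infer_instance

def pvWitness_make_sublists : List (List Int) := [[0, 0], [0, 1], [1, 3], [2, 2]]

def Spec_make_sublists (sorted_list : List (List Int)) (out : List (List (List Int))) : Prop := out = make_sublists_alt sorted_list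
instance (sorted_list : List (List Int)) (out : List (List (List Int))) : Decidable (Spec_make_sublists sorted_list out) := by unfold Spec_make_sublists; infer_instance

-- ===== CLAIM (what is proved, stated in full; the proofs are below) =====
def Claim_equal_make_sublists : Prop := ∀ (sorted_list : List (List Int)), Dom_make_sublists sorted_list → Pre_make_sublists sorted_list → Spec_make_sublists sorted_list (make_sublists sorted_list)

-- ===== LEMMAS AND PROOFS =====

-- attach a pending run `cur` (tagged with x-coordinate x) in front of already-built groups
def glue (x : Int) (cur : List (List Int)) (groups : List (List (List Int))) :
    List (List (List Int)) :=
  match groups with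
  | (q :: g0) :: gs => if q.headD 0 = x then (cur ++ q :: g0) :: gs else cur :: groups
  | _ => cur :: groups

theorem glue_head (p : List Int) (groups : List (List (List Int))) :
    glue (p.headD 0) [p] groups = stepB p groups := by
  cases groups with
  | nil => rfl
  | cons g gs =>
      cases g with
      | nil => rfl
      | cons q g0 => simp [glue, stepB]

-- the first group produced by stepB p groups starts with p
theorem stepB_head (p : List Int) (groups : List (List (List Int))) :
    ∃ g0 gs, stepB p groups = (p :: g0) :: gs := by
  cases groups with
  | nil => exact ⟨[], [], rfl⟩
  | cons g gs =>
      cases g with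
      | nil => exact ⟨[], [] :: gs, rfl⟩
      | cons q g0 =>
          simp only [stepB, List.singleton_append]
          by_cases h : (q.headD 0 == p.headD 0) = true
          · exact ⟨q :: g0, gs, by rw [if_pos h]⟩
          · exact ⟨[], (q :: g0) :: gs, by rw [if_neg h]⟩

theorem loop_invariant (l : List (List Int)) :
    ∀ subs x cur, (∀ p ∈ l, p.length = 2) → cur ≠ [] →
      (match l.foldl stepA (subs, some x, cur) with
       | (s, _, c) => if c ≠ [] then s ++ [c] else s) =
      subs ++ glue x cur (l.foldr stepB []) := by
  induction l with
  | nil => intro subs x cur _ hcur; simp [glue, hcur]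
  | cons p rest ih =>
      intro subs x cur hlen hcur
      obtain ⟨a, b, rfl⟩ : ∃ a b, p = [a, b] := by
        have h2 := hlen p (by simp)
        match p, h2 with
        | [a, b], _ => exact ⟨a, b, rfl⟩
      have hrest : ∀ q ∈ rest, q.length = 2 := fun q hq => hlen q (by simp [hq])
      rw [List.foldl_cons, List.foldr_cons]
      by_cases hx : a = x
      · subst hx
        have hstep : stepA (subs, some a, cur) [a, b] = (subs, some a, cur ++ [[a, b]]) := by
          simp [stepA]
        rw [hstep, ih subs a (cur ++ [[a, b]]) hrest (by simp)]
        congr 1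
        cases hgr : rest.foldr stepB [] with
        | nil => simp [glue, stepB]
        | cons g gs =>
            cases g with
            | nil => simp [glue, stepB]
            | cons q g0 =>
                simp only [glue, stepB, beq_iff_eq, List.singleton_append]
                split_ifs <;> simp_all [glue]
      · have hstep : stepA (subs, some x, cur) [a, b] = (subs ++ [cur], some a, [[a, b]]) := by
          simp [stepA, hx, hcur]
        rw [hstep, ih (subs ++ [cur]) a [[a, b]] hrest (by simp)]
        rw [show glue a [[a, b]] (rest.foldr stepB []) =
              stepB [a, b] (rest.foldr stepB []) from glue_head [a, b] _]
        obtain ⟨g0, gs, hg⟩ := stepB_head [a, b] (rest.foldr stepB [])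
        rw [hg, List.append_assoc]
        congr 1
        simp [glue, hx]

theorem convB_pre (p : List Int) (h : p.length = 2) : convB p = p := by
  match p, h with
  | [a, b], _ => rfl

theorem map_convB (l : List (List Int)) (h : ∀ p ∈ l, p.length = 2) :
    l.map convB = l := by
  induction l with
  | nil => rfl
  | cons q r ihr =>
      simp only [List.map_cons, convB_pre q (h q (by simp)),
        ihr (fun u hu => h u (by simp [hu]))]

theorem make_sublists_spec : Claim_equal_make_sublists := by
  intro l _ hpre
  unfold Spec_make_sublists make_sublists make_sublists_alt
  cases l with
  | nil => rfl
  | cons p rest =>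
      obtain ⟨a, b, rfl⟩ : ∃ a b, p = [a, b] := by
        have h2 := hpre p (by simp)
        match p, h2 with
        | [a, b], _ => exact ⟨a, b, rfl⟩
      have hrest : ∀ q ∈ rest, q.length = 2 := fun q hq => hpre q (by simp [hq])
      have hstep : stepA ([], none, []) [a, b] = ([], some a, [[a, b]]) := by
        simp [stepA]
      rw [List.foldl_cons, hstep, List.map_cons, List.foldr_cons, map_convB rest hrest,
        loop_invariant rest [] a [[a, b]] hrest (by simp), List.nil_append,
        show glue a [[a, b]] (rest.foldr stepB []) =
          stepB [a, b] (rest.foldr stepB []) from glue_head [a, b] _]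
      rfl

-- ===== VERDICT (by name: the statement is the Claim_ definition above) =====
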